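-- pv_equiv track=rewrite | github.com/sipa/ezbase32 | bech32.py | convertbits
-- ===== SOURCE A (Python) =====
-- def convertbits(data, frombits, tobits, pad=True):
--   acc = 0
--   bits = 0
--   ret = []
--   maxv = (1 << tobits) - 1
--   for d in data:
--     if d < 0 or (d >> frombits):
--       return None
--     acc = (acc << frombits) | d
--     bits += frombits
--     while (bits >= tobits):
--       bits -= tobits
--       ret.append((acc >> bits) & maxv)
--   if (pad):
--     if (bits):
--       ret.append((acc << (tobits - bits)) & maxv)
--   elif (acc << (tobits - bits)) & maxv:
--     return None
--   return ret
-- ===== SOURCE B (Python) =====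
-- def convertbits(data, frombits, tobits, pad=True):
--   for d in data:
--     if d < 0 or (d >> frombits):
--       return None
--   total = frombits * len(data)
--   acc = 0
--   for d in data:
--     acc = (acc << frombits) | d
--   nchunks = total // tobits
--   rbits = total - nchunks * tobits
--   maxv = (1 << tobits) - 1
--   ret = [(acc >> (total - (j + 1) * tobits)) & maxv for j in range(nchunks)]
--   if pad:
--     if rbits:
--       ret.append((acc & ((1 << rbits) - 1)) << (tobits - rbits))
--   elif acc & ((1 << rbits) - 1):
--     return None
--   return ret
-- ===== Notes on version B (the rewrite author's own statement) =====
-- stated objective: alternative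
-- what changed: Replaces A's streaming (acc, bits) state machine with its inner while-loop by a two-phase design: join all fields into one integer, then extract each output chunk by closed-form index arithmetic (shift and mask) and handle the remainder with a single mask.
-- outside the precondition, e.g. on convertbits([], 1, 0, True): A returns [], B raises ZeroDivisionError
import Mathlib
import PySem

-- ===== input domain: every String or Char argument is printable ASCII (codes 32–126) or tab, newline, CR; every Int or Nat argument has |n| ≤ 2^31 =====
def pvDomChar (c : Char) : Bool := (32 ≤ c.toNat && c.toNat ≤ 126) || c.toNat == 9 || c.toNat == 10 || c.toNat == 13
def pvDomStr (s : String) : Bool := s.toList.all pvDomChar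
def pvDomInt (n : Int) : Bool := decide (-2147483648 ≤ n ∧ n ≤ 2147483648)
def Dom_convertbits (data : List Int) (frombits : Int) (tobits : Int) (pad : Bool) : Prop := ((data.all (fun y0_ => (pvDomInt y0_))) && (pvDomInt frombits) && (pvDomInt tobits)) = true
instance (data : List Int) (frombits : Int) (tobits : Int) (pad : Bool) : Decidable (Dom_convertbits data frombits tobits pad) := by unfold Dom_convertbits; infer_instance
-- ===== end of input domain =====

-- B replaces A's streaming (acc, bits) state machine and inner while-loop by joining all
-- fields into one integer and extracting each chunk by closed-form index arithmetic
-- (objective: alternative decomposition of the same task, similar cost).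


-- ===== PORT A =====
-- inner 'while bits >= tobits' loop; fuel = bits.toNat suffices whenever tobits ≥ 1
def pvAInner (acc tobits maxv : Int) : Nat → Int → List Int → Int × List Int
  | 0, bits, ret => (bits, ret)
  | fuel + 1, bits, ret =>
    if tobits ≤ bits then
      pvAInner acc tobits maxv fuel (bits - tobits)
        (ret ++ [PySem.Int.band (acc >>> (bits - tobits).toNat) maxv])
    else (bits, ret)

-- the 'for d in data' loop carrying (acc, bits, ret); returns none on invalid d
def pvALoop (frombits tobits maxv : Int) : List Int → Int → Int → List Int → Option (Int × Int × List Int)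
  | [], acc, bits, ret => some (acc, bits, ret)
  | d :: rest, acc, bits, ret =>
    if d < 0 ∨ d >>> frombits.toNat ≠ 0 then none
    else
      let acc' := PySem.Int.bor (acc <<< frombits.toNat) d
      let p := pvAInner acc' tobits maxv (bits + frombits).toNat (bits + frombits) ret
      pvALoop frombits tobits maxv rest acc' p.1 p.2

def convertbits (data : List Int) (frombits : Int) (tobits : Int) (pad : Bool) : Option (List Int) :=
  let maxv := (1 <<< tobits.toNat) - 1
  match pvALoop frombits tobits maxv data 0 0 [] with
  | none => none
  | some (acc, bits, ret) =>
    if pad then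
      if bits ≠ 0 then some (ret ++ [PySem.Int.band (acc <<< (tobits - bits).toNat) maxv])
      else some ret
    else if PySem.Int.band (acc <<< (tobits - bits).toNat) maxv ≠ 0 then none
    else some ret

-- ===== PORT B =====
def convertbits_alt (data : List Int) (frombits : Int) (tobits : Int) (pad : Bool) : Option (List Int) :=
  if data.any (fun d => d < 0 || d >>> frombits.toNat != 0) then none
  else
    let total := frombits * (data.length : Int)
    let acc := data.foldl (fun a d => PySem.Int.bor (a <<< frombits.toNat) d) 0
    let nchunks := PySem.Int.floordiv total tobits
    let rbits := total - nchunks * tobits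
    let maxv := (1 <<< tobits.toNat) - 1
    let ret := (PySem.List.pyRange 0 nchunks 1).map
      (fun j => PySem.Int.band (acc >>> (total - (j + 1) * tobits).toNat) maxv)
    if pad then
      if rbits ≠ 0 then
        some (ret ++ [PySem.Int.band acc ((1 <<< rbits.toNat) - 1) <<< (tobits - rbits).toNat])
      else some ret
    else if PySem.Int.band acc ((1 <<< rbits.toNat) - 1) ≠ 0 then none
    else some ret

-- ===== PRECONDITION & SPEC =====
-- Pre_ excludes tobits < 0 (A raises ValueError at '1 << tobits'), frombits < 0 with
-- nonempty data (A raises ValueError at 'd >> frombits'), and tobits = 0 (A loops forever,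
-- or returns [] on empty data where B raises ZeroDivisionError) — except that inputs whose
-- FIRST element is already out of range stay inside Pre_, since there A short-circuits to
-- None before raising or looping.
def Pre_convertbits (data : List Int) (frombits : Int) (tobits : Int) (pad : Bool) : Prop :=
  (1 ≤ tobits ∧ (0 ≤ frombits ∨ data = [])) ∨
  (0 ≤ tobits ∧ ∃ d ∈ data.take 1, d < 0 ∨ (0 ≤ frombits ∧ d >>> frombits.toNat ≠ 0))
instance (data : List Int) (frombits : Int) (tobits : Int) (pad : Bool) : Decidable (Pre_convertbits data frombits tobits pad) := by unfold Pre_convertbits; infer_instance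
def pvWitness_convertbits : List Int × Int × Int × Bool := ([3, 1], 2, 4, true)

def Spec_convertbits (data : List Int) (frombits : Int) (tobits : Int) (pad : Bool) (out : Option (List Int)) : Prop := out = convertbits_alt data frombits tobits pad
instance (data : List Int) (frombits : Int) (tobits : Int) (pad : Bool) (out : Option (List Int)) : Decidable (Spec_convertbits data frombits tobits pad out) := by unfold Spec_convertbits; infer_instance

-- ===== CLAIM (what is proved, stated in full; the proofs are below) =====
def Claim_equal_convertbits : Prop := ∀ (data : List Int) (frombits : Int) (tobits : Int) (pad : Bool), Dom_convertbits data frombits tobits pad → Pre_convertbits data frombits tobits pad → Spec_convertbits data frombits tobits pad (convertbits data frombits tobits pad)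

-- ===== LEMMAS AND PROOFS =====

-- Nat-level descriptions of the bit stream, shared by the A-side and B-side proofs
def pvNatN (f : Nat) (ds : List Nat) : Nat := ds.foldl (fun a d => a * 2 ^ f + d) 0
def pvChunkF (N L t j : Nat) : Nat := N / 2 ^ (L - (j + 1) * t) % 2 ^ t
def pvChunksN (f t : Nat) (ds : List Nat) : List Int :=
  (List.range (f * ds.length / t)).map
    (fun j => ((pvChunkF (pvNatN f ds) (f * ds.length) t j : Nat) : Int))

theorem pv_shl_or (m d f : Nat) (h : d < 2 ^ f) : (m <<< f) ||| d = 2 ^ f * m + d := by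
  apply Nat.eq_of_testBit_eq; intro i
  rw [Nat.testBit_two_pow_mul_add m h i, Nat.testBit_or, Nat.testBit_shiftLeft]
  rcases Nat.lt_or_ge i f with hi | hi
  · simp [Nat.not_le.mpr hi, hi]
  · simp [hi, Nat.not_lt.mpr hi,
      Nat.testBit_lt_two_pow (Nat.lt_of_lt_of_le h (Nat.pow_le_pow_right (by omega) hi))]

theorem pvNatN_append_one (f : Nat) (ds : List Nat) (d : Nat) :
    pvNatN f (ds ++ [d]) = pvNatN f ds * 2 ^ f + d := by
  simp [pvNatN, List.foldl_append]

theorem pv_cast_shr (m k : Nat) : ((m : Int) >>> k) = ((m >>> k : Nat) : Int) := by simp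
theorem pv_cast_shl (m k : Nat) : ((m : Int) <<< k) = ((m <<< k : Nat) : Int) := by simp

theorem pv_chunk0 (acc B t : Nat) (h : t ≤ B) :
    (acc >>> (B - t)) &&& (2 ^ t - 1) = pvChunkF acc B t 0 := by
  rw [Nat.and_two_pow_sub_one_eq_mod, Nat.shiftRight_eq_div_pow, pvChunkF, Nat.one_mul]

theorem pvAInner_eq (t acc : Nat) (ht : 1 ≤ t) :
    ∀ (fuel B : Nat), B ≤ fuel → ∀ (ret : List Int),
    pvAInner (acc : Int) (t : Int) (((2 ^ t - 1 : Nat) : Int)) fuel (B : Int) ret =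
      (((B % t : Nat) : Int),
       ret ++ (List.range (B / t)).map (fun j => ((pvChunkF acc B t j : Nat) : Int))) := by
  intro fuel
  induction fuel with
  | zero =>
    intro B hB ret
    have hB0 : B = 0 := by omega
    subst hB0
    simp [pvAInner, Nat.zero_div, Nat.zero_mod]
  | succ fuel ih =>
    intro B hB ret
    by_cases hcase : t ≤ B
    · have hle : (t : Int) ≤ (B : Int) := by exact_mod_cast hcase
      have hsub : (B : Int) - (t : Int) = ((B - t : Nat) : Int) := by push_cast [hcase]; ring
      simp only [pvAInner, if_pos hle, hsub, Int.toNat_natCast]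
      rw [pv_cast_shr]
      rw [PySem.Int.band_natCast]
      rw [pv_chunk0 acc B t hcase]
      rw [ih (B - t) (by omega)]
      refine congrArg₂ Prod.mk ?_ ?_
      · rw [← Nat.mod_eq_sub_mod hcase]
      · rw [List.append_assoc]
        have hdiv : B / t = (B - t) / t + 1 := Nat.div_eq_sub_div (by omega) hcase
        rw [hdiv, List.range_succ_eq_map, List.map_cons, List.map_map]
        refine congrArg (ret ++ ·) (congrArg₂ List.cons rfl ?_)
        apply List.map_congr_left
        intro j hj
        simp only [Function.comp_apply]
        have e1 : pvChunkF acc (B - t) t j = pvChunkF acc B t (j + 1) := by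
          unfold pvChunkF
          have e2 : (j + 1 + 1) * t = (j + 1) * t + t := by ring
          have e3 : B - (j + 1 + 1) * t = B - t - (j + 1) * t := by omega
          rw [e3]
        rw [e1]
    · have hlt : B < t := by omega
      have hnle : ¬ ((t : Int) ≤ (B : Int)) := by exact_mod_cast hcase
      simp only [pvAInner, if_neg hnle]
      rw [Nat.mod_eq_of_lt hlt, Nat.div_eq_of_lt hlt]
      simp

theorem pvChunkF_stable (N d f t s : Nat) (hd : d < 2 ^ f) :
    (N * 2 ^ f + d) / 2 ^ (s + f) % 2 ^ t = N / 2 ^ s % 2 ^ t := by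
  have h1 : (2 : Nat) ^ (s + f) = 2 ^ f * 2 ^ s := by rw [pow_add]; ring
  rw [h1, ← Nat.div_div_eq_div_mul]
  have h2 : (N * 2 ^ f + d) / 2 ^ f = N := by
    rw [show N * 2 ^ f + d = 2 ^ f * N + d by ring, Nat.mul_add_div (Nat.two_pow_pos f),
      Nat.div_eq_of_lt hd, Nat.add_zero]
  rw [h2]

theorem pvChunksN_append_one (f t : Nat) (ht : 1 ≤ t) (ds : List Nat) (d : Nat)
    (hd : d < 2 ^ f) :
    pvChunksN f t (ds ++ [d]) =
      pvChunksN f t ds ++ (List.range ((f * ds.length % t + f) / t)).map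
        (fun j => ((pvChunkF (pvNatN f (ds ++ [d])) (f * ds.length % t + f) t j : Nat) : Int)) := by
  have htpos : 0 < t := ht
  set m := ds.length with hm
  set L := f * m with hL
  set q := L / t with hq
  set r := L % t with hr
  have hqr : t * q + r = L := Nat.div_add_mod L t
  have hL' : f * (ds ++ [d]).length = L + f := by
    simp only [List.length_append, List.length_cons, List.length_nil, hL, hm]
    ring
  have hdiv : (L + f) / t = q + (r + f) / t := by
    rw [show L + f = t * q + (r + f) by omega, Nat.mul_add_div htpos]
  have hN' : pvNatN f (ds ++ [d]) = pvNatN f ds * 2 ^ f + d := pvNatN_append_one f ds d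
  unfold pvChunksN
  rw [hL', hdiv, List.range_add, List.map_append]
  refine congrArg₂ (· ++ ·) ?_ ?_
  · apply List.map_congr_left
    intro j hj
    have hjq : j < q := List.mem_range.mp hj
    have hjt : (j + 1) * t ≤ L := by
      have : (j + 1) * t ≤ q * t := Nat.mul_le_mul_right _ (by omega)
      have h2 : q * t = t * q := by ring
      omega
    have he : L + f - (j + 1) * t = (L - (j + 1) * t) + f := by omega
    rw [pvChunkF, pvChunkF, he, hN', pvChunkF_stable _ _ _ _ _ hd]
  · rw [List.map_map]
    apply List.map_congr_left
    intro x hx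
    simp only [Function.comp_apply]
    rw [pvChunkF, pvChunkF]
    have he2 : (q + x + 1) * t = q * t + (x + 1) * t := by ring
    have he3 : q * t = t * q := by ring
    have he : L + f - (q + x + 1) * t = r + f - (x + 1) * t := by omega
    rw [he]

theorem pvALoop_none (frombits tobits maxv : Int) :
    ∀ (rest : List Int) (acc bits : Int) (ret : List Int),
      (∃ d ∈ rest, d < 0 ∨ d >>> frombits.toNat ≠ 0) →
      pvALoop frombits tobits maxv rest acc bits ret = none := by
  intro rest
  induction rest with
  | nil => intro _ _ _ h; simp at h
  | cons d rest ih =>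
    intro acc bits ret h
    by_cases hd : d < 0 ∨ d >>> frombits.toNat ≠ 0
    · simp [pvALoop, hd]
    · simp only [pvALoop, if_neg hd]
      apply ih
      obtain ⟨x, hx, hxbad⟩ := h
      rcases List.mem_cons.mp hx with rfl | hx
      · exact absurd hxbad hd
      · exact ⟨x, hx, hxbad⟩

theorem pvALoop_eq (f t : Nat) (ht : 1 ≤ t) :
    ∀ (rest pre : List Nat), (∀ x ∈ pre ++ rest, x < 2 ^ f) →
    pvALoop (f : Int) (t : Int) (((2 ^ t - 1 : Nat) : Int)) (rest.map (fun (n : Nat) => (n : Int)))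
        ((pvNatN f pre : Nat) : Int) (((f * pre.length % t : Nat)) : Int) (pvChunksN f t pre)
      = some (((pvNatN f (pre ++ rest) : Nat) : Int),
              (((f * (pre ++ rest).length % t : Nat)) : Int), pvChunksN f t (pre ++ rest)) := by
  intro rest
  induction rest with
  | nil => intro pre h; simp [pvALoop]
  | cons d rest ih =>
    intro pre h
    have hd : d < 2 ^ f := h d (by simp)
    have hcond : ¬ (((d : Int)) < 0 ∨ ((d : Int)) >>> ((f : Int)).toNat ≠ 0) := by
      rw [Int.toNat_natCast, pv_cast_shr]
      push_neg
      refine ⟨by positivity, ?_⟩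
      rw [Nat.shiftRight_eq_div_pow, Nat.div_eq_of_lt hd]
      simp
    simp only [List.map_cons, pvALoop, if_neg hcond]
    have hacc : PySem.Int.bor ((((pvNatN f pre : Nat)) : Int) <<< ((f : Int)).toNat) ((d : Int))
        = ((pvNatN f (pre ++ [d]) : Nat) : Int) := by
      rw [Int.toNat_natCast, pv_cast_shl, PySem.Int.bor_natCast, pv_shl_or _ _ _ hd,
        pvNatN_append_one]
      congr 1
      ring
    rw [hacc]
    have hbits : ((((f * pre.length % t : Nat)) : Int) + (f : Int))
        = (((f * pre.length % t + f : Nat)) : Int) := by push_cast; ring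
    rw [hbits, Int.toNat_natCast,
      pvAInner_eq t (pvNatN f (pre ++ [d])) ht _ _ le_rfl (pvChunksN f t pre)]
    have hmod : (f * pre.length % t + f) % t = f * (pre ++ [d]).length % t := by
      rw [Nat.mod_add_mod]
      congr 1
      simp only [List.length_append, List.length_cons, List.length_nil]
      ring
    have hchunks : pvChunksN f t pre ++
        (List.range ((f * pre.length % t + f) / t)).map
          (fun j => ((pvChunkF (pvNatN f (pre ++ [d])) (f * pre.length % t + f) t j : Nat) : Int))
        = pvChunksN f t (pre ++ [d]) := (pvChunksN_append_one f t ht pre d hd).symm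
    simp only [hmod, hchunks]
    have hre : pre ++ d :: rest = (pre ++ [d]) ++ rest := by simp
    rw [hre]
    exact ih (pre ++ [d]) (by intro x hx; apply h; simp at hx ⊢; tauto)

-- the common reference value both ports are reduced to (valid inputs)
def pvOutRef (f t : Nat) (ds : List Nat) (pad : Bool) : Option (List Int) :=
  if pad then
    if f * ds.length % t ≠ 0 then
      some (pvChunksN f t ds ++
        [((pvNatN f ds % 2 ^ (f * ds.length % t) * 2 ^ (t - f * ds.length % t) : Nat) : Int)])
    else some (pvChunksN f t ds)
  else if pvNatN f ds % 2 ^ (f * ds.length % t) ≠ 0 then none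
  else some (pvChunksN f t ds)

theorem pv_maxv (t : Nat) : ((1 <<< ((t : Int)).toNat - 1 : Nat) : Int) = ((2 ^ t - 1 : Nat) : Int) := by
  rw [Int.toNat_natCast, Nat.one_shiftLeft]

theorem pv_padchunk (N t r : Nat) (hr : r < t) :
    N <<< (t - r) &&& 2 ^ t - 1 = N % 2 ^ r * 2 ^ (t - r) := by
  rw [Nat.and_two_pow_sub_one_eq_mod, Nat.shiftLeft_eq,
    show (2 : Nat) ^ t = 2 ^ r * 2 ^ (t - r) by rw [← pow_add]; congr 1; omega,
    Nat.mul_mod_mul_right]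

theorem pvA_value (f t : Nat) (ht : 1 ≤ t) (ds : List Nat) (h : ∀ x ∈ ds, x < 2 ^ f)
    (pad : Bool) :
    convertbits (ds.map (fun (n : Nat) => (n : Int))) ((f : Nat) : Int) ((t : Nat) : Int) pad
      = pvOutRef f t ds pad := by
  have hloop := pvALoop_eq f t ht ds [] (by simpa using h)
  have hinit0 : ((pvNatN f [] : Nat) : Int) = 0 := by simp [pvNatN]
  have hinit1 : ((f * List.length ([] : List Nat) % t : Nat) : Int) = 0 := by simp
  have hinit2 : pvChunksN f t [] = [] := by simp [pvChunksN]
  rw [hinit0, hinit1, hinit2, List.nil_append] at hloop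
  set r := f * ds.length % t with hrdef
  have hrt : r < t := Nat.mod_lt _ (by omega)
  simp only [convertbits, pv_maxv, hloop]
  have hpc : PySem.Int.band (((pvNatN f ds : Nat) : Int) <<< (((t : Int)) - ((r : Nat) : Int)).toNat)
        (((2 ^ t - 1 : Nat) : Int))
      = ((pvNatN f ds % 2 ^ r * 2 ^ (t - r) : Nat) : Int) := by
    have htn : (((t : Int)) - ((r : Nat) : Int)).toNat = t - r := by omega
    rw [htn, pv_cast_shl, PySem.Int.band_natCast, pv_padchunk _ _ _ hrt]
  cases pad with
  | true =>
    rw [if_pos rfl]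
    by_cases hr0 : r = 0
    · rw [if_neg (by simp [hr0] : ¬(((r : Nat) : Int) ≠ 0))]
      simp only [pvOutRef]
      rw [← hrdef]
      simp [hr0]
    · rw [if_pos (by exact_mod_cast hr0 : ((r : Nat) : Int) ≠ 0), hpc]
      simp only [pvOutRef]
      rw [← hrdef]
      simp [hr0]
  | false =>
    rw [if_neg (by simp : ¬(false = true)), hpc]
    by_cases hz : pvNatN f ds % 2 ^ r = 0
    · rw [if_neg (by simp [hz] : ¬(((pvNatN f ds % 2 ^ r * 2 ^ (t - r) : Nat) : Int) ≠ 0))]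
      simp only [pvOutRef]
      rw [← hrdef]
      simp [hz]
    · have hnz : pvNatN f ds % 2 ^ r * 2 ^ (t - r) ≠ 0 := by
        have h2 := Nat.two_pow_pos (t - r)
        positivity
      rw [if_pos (by exact_mod_cast hnz : ((pvNatN f ds % 2 ^ r * 2 ^ (t - r) : Nat) : Int) ≠ 0)]
      simp only [pvOutRef]
      rw [← hrdef]
      simp [hz]

theorem pv_band_zero_left (m : Int) : PySem.Int.band 0 m = 0 := by
  rw [PySem.Int.band_comm, PySem.Int.band_zero]

theorem pvEmpty_A (fb : Int) (t : Nat) (pad : Bool) :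
    convertbits [] fb ((t : Nat) : Int) pad = some [] := by
  cases pad with
  | true => simp [convertbits, pvALoop]
  | false => simp [convertbits, pvALoop, pv_band_zero_left]


theorem pvAccFold (f : Nat) (ds : List Nat) (h : ∀ d ∈ ds, d < 2 ^ f) : ∀ v : Nat,
    (ds.map (fun (n : Nat) => (n : Int))).foldl
      (fun a d => PySem.Int.bor (a <<< f) d) (((v : Nat)) : Int)
      = ((ds.foldl (fun a d => a * 2 ^ f + d) v : Nat) : Int) := by
  induction ds with
  | nil => intro v; simp
  | cons d ds ih =>
    intro v
    simp only [List.map_cons, List.foldl_cons]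
    rw [pv_cast_shl, PySem.Int.bor_natCast, pv_shl_or v d f (h d (by simp)),
      show 2 ^ f * v + d = v * 2 ^ f + d by ring]
    exact ih (fun x hx => h x (by simp [hx])) _

theorem pv_mask (N r : Nat) :
    PySem.Int.band ((N : Nat) : Int) ((2 ^ r - 1 : Nat) : Int) = ((N % 2 ^ r : Nat) : Int) := by
  rw [PySem.Int.band_natCast, Nat.and_two_pow_sub_one_eq_mod]

theorem pv_maxv' (r : Nat) : ((1 <<< ((r : Int)).toNat : Nat) : Int) - 1 = ((2 ^ r - 1 : Nat) : Int) := by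
  rw [Int.toNat_natCast, Nat.one_shiftLeft]
  have h1 : (1 : Nat) ≤ 2 ^ r := Nat.one_le_two_pow
  push_cast [h1]
  ring

theorem pvB_value (f t : Nat) (ht : 1 ≤ t) (ds : List Nat) (h : ∀ x ∈ ds, x < 2 ^ f)
    (pad : Bool) :
    convertbits_alt (ds.map (fun (n : Nat) => (n : Int))) ((f : Nat) : Int) ((t : Nat) : Int) pad
      = pvOutRef f t ds pad := by
  have htpos : 0 < t := ht
  set L := f * ds.length with hLdef
  set N := pvNatN f ds with hNdef
  set r := L % t with hrdef
  have hrt : r < t := Nat.mod_lt _ (by omega)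
  have hany : (List.any (ds.map (fun (n : Nat) => (n : Int)))
      (fun d => decide (d < 0) || (d >>> (((f : Nat) : Int)).toNat != 0))) = false := by
    rw [List.any_eq_false]
    intro x hx
    simp only [List.mem_map] at hx
    obtain ⟨n, hn, rfl⟩ := hx
    have hlt : n < 2 ^ f := h n hn
    have h1 : ¬ ((n : Int) < 0) := by omega
    rw [Int.toNat_natCast, pv_cast_shr]
    simp [h1, Nat.shiftRight_eq_div_pow, Nat.div_eq_of_lt hlt]
  have htotal : ((f : Nat) : Int) * (((ds.map (fun (n : Nat) => (n : Int))).length : Nat) : Int)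
      = ((L : Nat) : Int) := by
    rw [List.length_map, hLdef]
    push_cast
    ring
  have hacc : (ds.map (fun (n : Nat) => (n : Int))).foldl
      (fun a d => PySem.Int.bor (a <<< (((f : Nat) : Int)).toNat) d) 0 = ((N : Nat) : Int) := by
    simp only [Int.toNat_natCast]
    have h0 := pvAccFold f ds h 0
    rw [show (((0 : Nat)) : Int) = (0 : Int) from rfl] at h0
    rw [h0, hNdef, pvNatN]
  have hfd : PySem.Int.floordiv ((L : Nat) : Int) ((t : Nat) : Int) = ((L / t : Nat) : Int) :=
    PySem.Int.floordiv_natCast L t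
  have hqt : L / t * t + r = L := by
    have h1 := Nat.div_add_mod L t
    have h2 : L / t * t = t * (L / t) := Nat.mul_comm _ _
    omega
  have hrb : ((L : Nat) : Int) - ((L / t : Nat) : Int) * ((t : Nat) : Int) = ((r : Nat) : Int) := by
    have h3 : ((L / t * t : Nat) : Int) + ((r : Nat) : Int) = ((L : Nat) : Int) := by
      exact_mod_cast congrArg (fun n : Nat => (n : Int)) hqt
    push_cast at h3 ⊢
    linarith
  have hret : (PySem.List.pyRange 0 ((L / t : Nat) : Int) 1).map
      (fun j => PySem.Int.band (((N : Nat) : Int) >>> (((L : Nat) : Int) - (j + 1) * ((t : Nat) : Int)).toNat)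
        ((2 ^ t - 1 : Nat) : Int))
      = pvChunksN f t ds := by
    rw [PySem.List.pyRange_one, List.map_map, Int.sub_zero, Int.toNat_natCast]
    unfold pvChunksN
    rw [← hLdef, ← hNdef]
    apply List.map_congr_left
    intro j hj
    have hjlt : j < L / t := List.mem_range.mp hj
    have hjt : (j + 1) * t ≤ L := by
      have h1 : (j + 1) * t ≤ (L / t) * t := Nat.mul_le_mul_right _ (by omega)
      have h2 : L / t * t ≤ L := Nat.div_mul_le_self L t
      omega
    simp only [Function.comp_apply]
    have he2 : ((0 : Int) + (j : Int) + 1) * ((t : Nat) : Int) = (((j + 1) * t : Nat) : Int) := by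
      push_cast
      ring
    rw [he2]
    have htn : (((L : Nat) : Int) - (((j + 1) * t : Nat) : Int)).toNat = L - (j + 1) * t := by
      omega
    rw [htn, pv_cast_shr, PySem.Int.band_natCast, Nat.and_two_pow_sub_one_eq_mod,
      Nat.shiftRight_eq_div_pow]
    rfl
  simp only [convertbits_alt, hany, Bool.false_eq_true, if_false, htotal, hacc, hfd, hrb,
    pv_maxv, pv_maxv', hret]
  cases pad with
  | true =>
    rw [if_pos rfl]
    by_cases hr0 : r = 0
    · rw [if_neg (by simp [hr0] : ¬(((r : Nat) : Int) ≠ 0))]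
      simp only [pvOutRef]
      rw [← hrdef, ← hNdef]
      simp [hr0]
    · rw [if_pos (by exact_mod_cast hr0 : ((r : Nat) : Int) ≠ 0), pv_mask]
      have htn : (((t : Nat) : Int) - ((r : Nat) : Int)).toNat = t - r := by omega
      rw [htn, pv_cast_shl, Nat.shiftLeft_eq]
      simp only [pvOutRef]
      rw [← hrdef, ← hNdef]
      simp [hr0]
  | false =>
    rw [if_neg (by simp : ¬(false = true)), pv_mask]
    by_cases hz : N % 2 ^ r = 0
    · rw [if_neg (by simp [hz] : ¬(((N % 2 ^ r : Nat) : Int) ≠ 0))]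
      simp only [pvOutRef]
      rw [← hrdef, ← hNdef]
      simp [hz]
    · rw [if_pos (by exact_mod_cast hz : ((N % 2 ^ r : Nat) : Int) ≠ 0)]
      simp only [pvOutRef]
      rw [← hrdef, ← hNdef]
      simp [hz]

theorem pvEmpty_B (fb : Int) (t : Nat) (ht : 1 ≤ t) (pad : Bool) :
    convertbits_alt [] fb ((t : Nat) : Int) pad = some [] := by
  have ht0 : (0 : Int) < ((t : Nat) : Int) := by exact_mod_cast ht
  cases pad with
  | true =>
    simp [convertbits_alt, PySem.Int.floordiv_eq_ediv_of_pos ht0, PySem.List.pyRange_one,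
      pv_band_zero_left]
  | false =>
    simp [convertbits_alt, PySem.Int.floordiv_eq_ediv_of_pos ht0, PySem.List.pyRange_one,
      pv_band_zero_left]


-- ===== VERDICT (by name: the statement is the Claim_ definition above) =====
theorem convertbits_spec : Claim_equal_convertbits := by
  unfold Claim_equal_convertbits
  intro data frombits tobits pad _hdom hpre
  unfold Spec_convertbits
  rcases hpre with ⟨ht1, hfe⟩ | ⟨ht0, d0, hd0mem, hbad0⟩
  case inr =>
    match data, hd0mem with
    | d0' :: rest, hd0mem =>
      have hd0eq : d0 = d0' := by simpa using hd0mem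
      subst hd0eq
      have hbad : d0 < 0 ∨ d0 >>> frombits.toNat ≠ 0 := by
        rcases hbad0 with h1 | ⟨_, h2⟩
        · exact Or.inl h1
        · exact Or.inr h2
      have hA : convertbits (d0 :: rest) frombits tobits pad = none := by
        simp only [convertbits]
        rw [pvALoop_none frombits tobits _ (d0 :: rest) 0 0 [] ⟨d0, by simp, hbad⟩]
      have hBc : ((d0 :: rest).any (fun d => decide (d < 0) || (d >>> frombits.toNat != 0))) = true := by
        rcases hbad with h1 | h1
        · simp [h1]
        · simp [h1]
      have hB : convertbits_alt (d0 :: rest) frombits tobits pad = none := by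
        simp only [convertbits_alt, hBc, if_true]
      rw [hA, hB]
  have htc : tobits = ((tobits.toNat : Nat) : Int) := by omega
  have ht : 1 ≤ tobits.toNat := by omega
  by_cases hdata : data = []
  · subst hdata
    rw [htc, pvEmpty_A frombits tobits.toNat pad, pvEmpty_B frombits tobits.toNat ht pad]
  · have hf0 : 0 ≤ frombits := by
      rcases hfe with h | h
      · exact h
      · exact absurd h hdata
    have hfc : frombits = ((frombits.toNat : Nat) : Int) := by omega
    by_cases hbad : ∃ d ∈ data, d < 0 ∨ d >>> frombits.toNat ≠ 0
    · have hA : convertbits data frombits tobits pad = none := by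
        simp only [convertbits]
        rw [pvALoop_none frombits tobits _ data 0 0 [] hbad]
      have hBc : (data.any (fun d => decide (d < 0) || (d >>> frombits.toNat != 0))) = true := by
        rw [List.any_eq_true]
        obtain ⟨d, hd, hor⟩ := hbad
        refine ⟨d, hd, ?_⟩
        rcases hor with h1 | h1
        · simp [h1]
        · simp [h1]
      have hB : convertbits_alt data frombits tobits pad = none := by
        simp only [convertbits_alt, hBc, if_true]
      rw [hA, hB]
    · push_neg at hbad
      have hgood : ∀ d ∈ data, 0 ≤ d ∧ d >>> frombits.toNat = 0 := by
        intro d hd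
        have h1 := hbad d hd
        exact ⟨by omega, h1.2⟩
      have hdseq : data = (data.map Int.toNat).map (fun (n : Nat) => (n : Int)) := by
        rw [List.map_map]
        have hcg : ∀ d ∈ data, ((fun (n : Nat) => (n : Int)) ∘ Int.toNat) d = id d := by
          intro d hd
          simp [Int.toNat_of_nonneg (hgood d hd).1]
        rw [List.map_congr_left hcg, List.map_id]
      have hvalid : ∀ x ∈ data.map Int.toNat, x < 2 ^ frombits.toNat := by
        intro x hx
        simp only [List.mem_map] at hx
        obtain ⟨d, hd, rfl⟩ := hx
        have h2 := (hgood d hd).2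
        have h3 : d = ((d.toNat : Nat) : Int) := by
          have := (hgood d hd).1
          omega
        rw [h3, pv_cast_shr] at h2
        have h4 : d.toNat >>> frombits.toNat = 0 := by exact_mod_cast h2
        rw [Nat.shiftRight_eq_div_pow] at h4
        rcases Nat.lt_or_ge d.toNat (2 ^ frombits.toNat) with hlt | hge
        · exact hlt
        · exfalso
          have h5 : 1 ≤ d.toNat / 2 ^ frombits.toNat :=
            (Nat.one_le_div_iff (Nat.two_pow_pos _)).mpr hge
          omega
      rw [hdseq, hfc, htc,
        pvA_value frombits.toNat tobits.toNat ht (data.map Int.toNat) hvalid pad,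
        pvB_value frombits.toNat tobits.toNat ht (data.map Int.toNat) hvalid pad]
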